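-- pv_equiv track=rewrite | github.com/hrivu21/coding | Codechef/SPACEARR.py | f
-- ===== SOURCE A (Python) =====
-- def f(l):
--     l.sort()
--     diff = 0
--     for i in range(1, len(l)+1):
--         if i < l[i-1]:
--             return 0
--         diff += i - l[i-1]
--     return diff
-- ===== SOURCE B (Python) =====
-- def f(l):
--     # Counting pass instead of sorting: O(n) vs O(n log n). Does not mutate l (A sorts it in place).
--     n = len(l)
--     cnt = {}
--     total = 0
--     for x in l:
--         k = 0 if x <= 0 else (x if x <= n else n + 1)
--         cnt[k] = cnt.get(k, 0) + 1
--         total += x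
--     run = cnt.get(0, 0)
--     for i in range(1, n + 1):
--         run += cnt.get(i, 0)
--         if run < i:
--             return 0
--     return n * (n + 1) // 2 - total
-- ===== Notes on version B (the rewrite author's own statement) =====
-- stated objective: faster
-- what changed: Replaces the sort-then-scan (check sorted l[i-1] <= i while summing gaps) by a single counting pass into a dict plus a prefix-sum feasibility check, returning n(n+1)/2 - sum(l) in the feasible case; B also does not mutate l whereas A sorts it in place.
import Mathlib
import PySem

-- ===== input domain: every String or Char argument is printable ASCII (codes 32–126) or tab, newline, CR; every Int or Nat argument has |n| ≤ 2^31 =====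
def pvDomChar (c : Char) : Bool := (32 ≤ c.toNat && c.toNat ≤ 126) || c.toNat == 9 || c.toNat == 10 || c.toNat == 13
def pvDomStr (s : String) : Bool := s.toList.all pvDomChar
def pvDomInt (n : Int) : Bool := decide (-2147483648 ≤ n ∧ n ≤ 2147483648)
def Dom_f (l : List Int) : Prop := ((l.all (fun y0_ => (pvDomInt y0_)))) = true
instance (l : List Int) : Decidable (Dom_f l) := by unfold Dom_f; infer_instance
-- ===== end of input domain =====

-- B replaces A's sort-then-scan by one counting pass (dict) plus a prefix-sum check and the
-- closed form n(n+1)/2 - sum(l); return-value equivalence only: A sorts l in place, B does not mutate l.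

-- ===== PORT A =====
-- the loop 'for i in range(1, len(l)+1)' over the sorted list; index i-1 is always in
-- range on this loop's indices, so pyGetD with default 0 is exact here
def aLoop (s : List Int) : List Int → Int → Int
  | [], diff => diff
  | i :: rest, diff =>
    let v := PySem.List.pyGetD s (i - 1) 0
    if i < v then 0 else aLoop s rest (diff + (i - v))

def f (l : List Int) : Int :=
  let s := PySem.List.sorted l (fun x => x) false
  aLoop s (PySem.List.pyRange 1 ((s.length : Int) + 1) 1) 0

-- ===== PORT B =====
-- k = 0 if x <= 0 else (x if x <= n else n + 1)
def bKey (n x : Int) : Int := if x ≤ 0 then 0 else if x ≤ n then x else n + 1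

-- 'for i in range(1, n+1): run += cnt.get(i, 0); if run < i: return 0'
def bCheck (cnt : PySem.Dict Int Int) : List Int → Int → Bool
  | [], _ => true
  | i :: rest, run =>
    let run' := run + cnt.getD i 0
    if run' < i then false else bCheck cnt rest run'

def f_alt (l : List Int) : Int :=
  let n : Int := l.length
  let st := l.foldl (fun (p : PySem.Dict Int Int × Int) x =>
    let k := bKey n x
    (p.1.insert k (p.1.getD k 0 + 1), p.2 + x)) (PySem.Dict.empty, 0)
  if bCheck st.1 (PySem.List.pyRange 1 (n + 1) 1) (st.1.getD 0 0) then
    PySem.Int.floordiv (n * (n + 1)) 2 - st.2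
  else 0

-- ===== PRECONDITION & SPEC =====
def Spec_f (l : List Int) (out : Int) : Prop := out = f_alt l
instance (l : List Int) (out : Int) : Decidable (Spec_f l out) := by unfold Spec_f; infer_instance

-- ===== CLAIM (what is proved, stated in full; the proofs are below) =====
def Claim_equal_f : Prop := ∀ (l : List Int), Dom_f l → Spec_f l (f l)

-- ===== LEMMAS AND PROOFS =====

-- number of elements of l that are ≤ j, as an Int
def cLE (l : List Int) (j : Int) : Int := (l.countP (fun x => decide (x ≤ j)) : Nat)

-- A's loop, for an arbitrary index list: 0 as soon as some index fails, else the sum of gaps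
theorem aLoop_spec (s : List Int) (is : List Int) (diff : Int) :
    aLoop s is diff =
      if is.all (fun j => decide (PySem.List.pyGetD s (j - 1) 0 ≤ j)) then
        diff + (is.map (fun j => j - PySem.List.pyGetD s (j - 1) 0)).sum
      else 0 := by
  induction is generalizing diff with
  | nil => simp [aLoop]
  | cons i rest ih =>
    simp only [aLoop, List.all_cons, List.map_cons, List.sum_cons]
    by_cases h : i < PySem.List.pyGetD s (i - 1) 0
    · simp [h, not_le.mpr h]
    · rw [if_neg h, ih]
      have : PySem.List.pyGetD s (i - 1) 0 ≤ i := not_lt.mp h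
      simp only [this, decide_true, Bool.true_and]
      split_ifs <;> ring_nf

-- countP (· ≤ i) = countP (· ≤ i-1) + count i, over Int lists
theorem countP_le_split (l : List Int) (i : Int) :
    l.countP (fun x => decide (x ≤ i)) = l.countP (fun x => decide (x ≤ i - 1)) + l.count i := by
  induction l with
  | nil => simp
  | cons x t ih =>
    simp only [List.countP_cons, List.count_cons, ih]
    by_cases hx : x = i
    · subst hx; simp; omega
    · have h1 : (x ≤ i) ↔ (x ≤ i - 1) := by omega
      simp [hx, h1]
      omega

-- sorted characterization: s[j] ≤ v ↔ at least j+1 elements of s are ≤ v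
theorem sorted_getElem_le_iff (s : List Int) (hp : s.Pairwise (· ≤ ·)) (j : Nat)
    (hj : j < s.length) (v : Int) :
    s[j] ≤ v ↔ j + 1 ≤ s.countP (fun x => decide (x ≤ v)) := by
  have hmono : ∀ (p q : Nat) (hpq : p ≤ q) (hq : q < s.length), s[p]'(by omega) ≤ s[q] := by
    intro p q hpq hq
    rcases eq_or_lt_of_le hpq with rfl | hlt
    · exact le_refl _
    · exact List.pairwise_iff_getElem.mp hp p q (by omega) hq hlt
  constructor
  · intro h
    rw [← List.take_append_drop (j+1) s, List.countP_append]
    have htake : (s.take (j+1)).countP (fun x => decide (x ≤ v)) = j + 1 := by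
      have hlen : (s.take (j+1)).length = j + 1 := by simp; omega
      rw [List.countP_eq_length.mpr, hlen]
      intro x hx
      simp only [decide_eq_true_eq]
      obtain ⟨k, hk, rfl⟩ := List.mem_take_iff_getElem.mp hx
      have hkj : k ≤ j := by omega
      exact le_trans (hmono k j hkj hj) h
    omega
  · intro h
    by_contra hvj
    rw [not_le] at hvj
    have hdrop : (s.drop j).countP (fun x => decide (x ≤ v)) = 0 := by
      rw [List.countP_eq_zero]
      intro x hx
      simp only [decide_eq_true_eq, not_le]
      obtain ⟨k, hk, rfl⟩ := List.mem_drop_iff_getElem.mp hx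
      calc v < s[j] := hvj
        _ ≤ _ := hmono j (j+k) (by omega) (by omega)
    have : s.countP (fun x => decide (x ≤ v)) ≤ j := by
      rw [← List.take_append_drop j s, List.countP_append, hdrop]
      have := List.countP_le_length (p := fun x => decide (x ≤ v)) (l := s.take j)
      simp at this ⊢
      omega
    omega

-- B's check loop over range a..n, with run = cLE l (a-1) as the loop invariant
theorem bCheck_spec (cnt : PySem.Dict Int Int) (l : List Int) (n : Int)
    (hcnt : ∀ i : Int, 1 ≤ i → i ≤ n → cnt.getD i 0 = cLE l i - cLE l (i - 1))
    (k : Nat) (a : Int) (h1 : 1 ≤ a) (hk : a + k = n + 1) :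
    bCheck cnt (PySem.List.pyRange a (n + 1) 1) (cLE l (a - 1)) =
      (PySem.List.pyRange a (n + 1) 1).all (fun i => decide (i ≤ cLE l i)) := by
  induction k generalizing a with
  | zero =>
    rw [PySem.List.pyRange_one_eq_nil (by omega)]
    simp [bCheck]
  | succ m ih =>
    rw [PySem.List.pyRange_one_cons (by omega)]
    simp only [bCheck, List.all_cons]
    have ha : cnt.getD a 0 = cLE l a - cLE l (a - 1) := hcnt a h1 (by omega)
    have hrun : cLE l (a - 1) + cnt.getD a 0 = cLE l a := by rw [ha]; ring
    rw [hrun]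
    by_cases hlt : cLE l a < a
    · simp [hlt, not_le.mpr hlt]
    · rw [if_neg hlt]
      have hst : cLE l ((a + 1) - 1) = cLE l a := by norm_num
      rw [← hst, ih (a + 1) (by omega) (by omega), hst]
      simp [not_lt.mp hlt]

-- 2 * (1 + 2 + … + m) = m (m+1)
theorem sum_pyRange_one (m : Nat) :
    2 * (PySem.List.pyRange 1 ((m : Int) + 1) 1).sum = (m : Int) * ((m : Int) + 1) := by
  induction m with
  | zero => simp [PySem.List.pyRange_one_eq_nil]
  | succ p ih =>
    rw [show ((p + 1 : Nat) : Int) + 1 = ((p : Int) + 1) + 1 by push_cast; ring,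
      PySem.List.pyRange_one_succ_right (by omega)]
    simp only [List.sum_append, List.sum_cons, List.sum_nil]
    push_cast
    ring_nf
    ring_nf at ih
    omega

-- the pair-state fold of B splits into the dict fold and the running total
theorem foldl_pair (l : List Int) (g : Int → Int) (d : PySem.Dict Int Int) (t : Int) :
    l.foldl (fun (p : PySem.Dict Int Int × Int) x =>
      (p.1.insert (g x) (p.1.getD (g x) 0 + 1), p.2 + x)) (d, t)
    = (l.foldl (fun d x => d.insert (g x) (d.getD (g x) 0 + 1)) d, t + l.sum) := by
  induction l generalizing d t with
  | nil => simp
  | cons x r ih => simp [List.foldl_cons, ih]; ring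

-- the counting dict holds the multiplicity of each key
theorem cnt_getD (l : List Int) (g : Int → Int) (v : Int) :
    (l.foldl (fun d x => d.insert (g x) (d.getD (g x) 0 + 1)) PySem.Dict.empty).getD v 0
      = ((l.map g).count v : Int) := by
  have h1 : l.foldl (fun d x => d.insert (g x) (d.getD (g x) 0 + 1)) (PySem.Dict.empty : PySem.Dict Int Int)
      = (l.map g).foldl (fun d z => d.insert z (d.getD z 0 + 1)) (PySem.Dict.empty : PySem.Dict Int Int) := by
    rw [List.foldl_map]
  rw [h1, PySem.Dict.foldl_insert_getD_add_one_eq_counter, PySem.Dict.getD_counter]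

theorem count_map_bKey (l : List Int) (n i : Int) (h1 : 1 ≤ i) (h2 : i ≤ n) :
    (l.map (bKey n)).count i = l.count i := by
  simp only [List.count_eq_countP, List.countP_map]
  apply List.countP_congr
  intro x _
  have h : (bKey n x = i) ↔ (x = i) := by unfold bKey; split_ifs <;> omega
  simp only [Function.comp_apply]
  by_cases hx : x = i
  · subst hx
    have hb : bKey n x = x := by unfold bKey; split_ifs <;> omega
    simp [hb]
  · have hb : bKey n x ≠ i := fun hh => hx (h.mp hh)
    simp [hx, hb]

theorem count_map_bKey_zero (l : List Int) (n : Int) (hn : 0 ≤ n) :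
    ((l.map (bKey n)).count 0 : Int) = cLE l 0 := by
  simp only [List.count_eq_countP, List.countP_map, cLE]
  congr 1
  apply List.countP_congr
  intro x _
  have h : (bKey n x = 0) ↔ (x ≤ 0) := by unfold bKey; split_ifs <;> omega
  simp only [Function.comp_apply]
  by_cases hx : x ≤ 0
  · have hb : bKey n x = 0 := h.mpr hx
    simp [hx, hb]
  · have hb : bKey n x ≠ 0 := fun hh => hx (h.mp hh)
    simp [hx, hb]

theorem all_congr_mem {α : Type} (is : List α) (p q : α → Bool)
    (h : ∀ x ∈ is, p x = q x) : is.all p = is.all q := by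
  induction is with
  | nil => rfl
  | cons x r ih =>
    simp only [List.all_cons, h x (List.mem_cons_self), ih fun y hy => h y (List.mem_cons_of_mem _ hy)]

theorem sum_map_sub (is : List Int) (g h : Int → Int) :
    (is.map (fun j => g j - h j)).sum = (is.map g).sum - (is.map h).sum := by
  induction is with
  | nil => simp
  | cons x r ih => simp [ih]; ring

theorem f_eq_f_alt (l : List Int) : f l = f_alt l := by
  simp only [f, f_alt]
  set m : Nat := l.length with hm
  set n : Int := (m : Int) with hn
  set s : List Int := PySem.List.sorted l (fun x => x) false with hs
  have hslen : s.length = m := PySem.List.length_sorted l _ false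
  have hperm : s.Perm l := PySem.List.sorted_perm l _ false
  have hcntP : ∀ v : Int, s.countP (fun x => decide (x ≤ v)) = l.countP (fun x => decide (x ≤ v)) :=
    fun v => hperm.countP_eq _
  rw [foldl_pair l (bKey n) PySem.Dict.empty 0]
  rw [hslen, aLoop_spec]
  have hgetD : ∀ v : Int,
      (l.foldl (fun d x => d.insert (bKey n x) (d.getD (bKey n x) 0 + 1)) PySem.Dict.empty).getD v 0
      = ((l.map (bKey n)).count v : Int) := cnt_getD l (bKey n)
  have hcnt : ∀ i : Int, 1 ≤ i → i ≤ n →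
      (l.foldl (fun d x => d.insert (bKey n x) (d.getD (bKey n x) 0 + 1)) PySem.Dict.empty).getD i 0
      = cLE l i - cLE l (i - 1) := by
    intro i hi1 hi2
    rw [hgetD i, count_map_bKey l n i hi1 hi2]
    have := countP_le_split l i
    unfold cLE
    omega
  have hinit :
      (l.foldl (fun d x => d.insert (bKey n x) (d.getD (bKey n x) 0 + 1)) PySem.Dict.empty).getD 0 0
      = cLE l (1 - 1) := by
    rw [hgetD 0, count_map_bKey_zero l n (by positivity)]
    norm_num
  rw [show (0 : Int) + l.sum = l.sum by ring]
  simp only [hinit]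
  rw [bCheck_spec _ l n hcnt m 1 le_rfl (by omega)]
  have hall :
      (PySem.List.pyRange 1 (n + 1) 1).all (fun j => decide (PySem.List.pyGetD s (j - 1) 0 ≤ j))
      = (PySem.List.pyRange 1 (n + 1) 1).all (fun i => decide (i ≤ cLE l i)) := by
    apply all_congr_mem
    intro j hj
    rw [PySem.List.mem_pyRange_one] at hj
    obtain ⟨hj1, hj2⟩ := hj
    have hjnlt : (j - 1).toNat < s.length := by rw [hslen]; omega
    have hjlt : j - 1 < (s.length : Int) := by rw [hslen]; omega
    rw [PySem.List.pyGetD_eq_getElem s 0 (by omega) hjlt]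
    have hiff : s[(j - 1).toNat] ≤ j ↔ j ≤ cLE l j := by
      have h := sorted_getElem_le_iff s (PySem.List.sorted_pairwise l (fun x => x)) ((j - 1).toNat) hjnlt j
      rw [hcntP j] at h
      rw [h]
      unfold cLE
      omega
    exact decide_eq_decide.mpr hiff
  rw [hall]
  by_cases hcond : (PySem.List.pyRange 1 (n + 1) 1).all (fun i => decide (i ≤ cLE l i)) = true
  · rw [if_pos hcond, if_pos hcond]
    rw [show (0 : Int) + ((PySem.List.pyRange 1 (n+1) 1).map (fun j => j - PySem.List.pyGetD s (j - 1) 0)).sum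
        = ((PySem.List.pyRange 1 (n+1) 1).map (fun j => j - PySem.List.pyGetD s (j - 1) 0)).sum by ring]
    rw [sum_map_sub]
    have hmapid : (PySem.List.pyRange 1 (n+1) 1).map (fun j => j) = PySem.List.pyRange 1 (n+1) 1 := by simp
    have hmaps : (PySem.List.pyRange 1 (n+1) 1).map (fun j => PySem.List.pyGetD s (j - 1) 0) = s := by
      rw [PySem.List.pyRange_one, List.map_map]
      have h1 : ((n : Int) + 1 - 1).toNat = m := by omega
      rw [h1]
      have h2 : ∀ k : Nat, ((fun j => PySem.List.pyGetD s (j - 1) 0) ∘ fun k : Nat => (1 : Int) + ↑k) k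
          = s.getD k 0 := by
        intro k
        simp only [Function.comp_apply]
        rw [show (1 : Int) + (k : Int) - 1 = (k : Int) by ring, PySem.List.pyGetD_natCast]
      rw [List.map_congr_left (fun k _ => h2 k)]
      apply List.ext_getElem
      · simp [hslen]
      · intro i h1' h2'
        simp only [List.getElem_map, List.getElem_range]
        rw [List.getD_eq_getElem]
    rw [hmapid, hmaps]
    have hfd : PySem.Int.floordiv (n * (n + 1)) 2 = (PySem.List.pyRange 1 (n+1) 1).sum := by
      rw [← sum_pyRange_one m, PySem.Int.floordiv_eq_ediv_of_pos (by norm_num)]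
      exact Int.mul_ediv_cancel_left _ (by norm_num)
    rw [hfd, hperm.sum_eq]
  · rw [if_neg hcond, if_neg hcond]

-- ===== VERDICT (by name: the statement is the Claim_ definition above) =====
theorem f_spec : Claim_equal_f := by
  intro l _
  unfold Spec_f
  exact f_eq_f_alt l
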